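-- pv_equiv track=rewrite | github.com/vaishu567/dsapracrepo | contests/whohasmajority.py | majorityWins
-- ===== SOURCE A (Python) =====
-- def majorityWins(arr, n, x, y):
--     # code here
--     frex=0
--     frey=0
--     for i in range(n):
--         if arr[i]==x:
--             frex+=1
--         elif arr[i]==y:
--             frey+=1
--     if frex>frey:
--         return x
--     elif frey>frex:
--         return y
--     else:
--         return min(x,y)
-- ===== SOURCE B (Python) =====
-- def majorityWins(arr, n, x, y):
--     # Divide-and-conquer: split the prefix in halves, count on each half, combine.
--     def counts(seg):
--         if len(seg) <= 1:
--             if not seg: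
--                 return (0, 0)
--             v = seg[0]
--             return (1 if v == x else 0, 1 if v == y else 0)
--         m = len(seg) // 2
--         a = counts(seg[:m])
--         b = counts(seg[m:])
--         return (a[0] + b[0], a[1] + b[1])
--     cx, cy = counts(arr[:max(n, 0)])
--     if cx > cy:
--         return x
--     if cy > cx:
--         return y
--     return min(x, y)
-- ===== Notes on version B (the rewrite author's own statement) =====
-- stated objective: alternative
-- what changed: Replaces A's indexed linear loop with two branch-coupled accumulators by a divide-and-conquer recursion that splits the prefix into halves, returns (count x, count y) pairs for each half and combines them by addition before the final comparison.
import Mathlib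
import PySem

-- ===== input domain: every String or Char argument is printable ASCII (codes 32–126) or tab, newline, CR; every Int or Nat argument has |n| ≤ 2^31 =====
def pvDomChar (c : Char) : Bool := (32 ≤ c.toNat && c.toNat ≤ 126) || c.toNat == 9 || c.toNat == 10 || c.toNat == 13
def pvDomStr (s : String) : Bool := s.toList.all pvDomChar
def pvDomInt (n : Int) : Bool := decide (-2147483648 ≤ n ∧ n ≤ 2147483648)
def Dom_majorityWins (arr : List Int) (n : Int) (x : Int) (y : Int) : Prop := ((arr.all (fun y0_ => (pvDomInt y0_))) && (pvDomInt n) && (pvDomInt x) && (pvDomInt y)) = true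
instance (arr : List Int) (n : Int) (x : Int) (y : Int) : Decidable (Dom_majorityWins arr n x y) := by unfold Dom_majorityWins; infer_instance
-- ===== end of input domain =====

-- B replaces A's indexed linear loop by a divide-and-conquer recursion over the prefix
-- that returns (count x, count y) pairs per half and sums them; same cost, different shape.

-- ===== PORT A =====
def majorityWins (arr : List Int) (n : Int) (x : Int) (y : Int) : Int :=
  let st := (PySem.List.pyRange 0 n 1).foldl
    (fun (p : Int × Int) i =>
      if PySem.List.pyGetD arr i 0 = x then (p.1 + 1, p.2)
      else if PySem.List.pyGetD arr i 0 = y then (p.1, p.2 + 1)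
      else p)
    (0, 0)
  if st.1 > st.2 then x
  else if st.2 > st.1 then y
  else min x y

-- ===== PORT B =====
-- B's recursive helper: counts of x and y in a segment, by halving.
def pvCounts (x y : Int) (seg : List Int) : Int × Int :=
  if h : seg.length ≤ 1 then
    match seg with
    | [] => (0, 0)
    | v :: _ => ((if v = x then 1 else 0), (if v = y then 1 else 0))
  else
    let m := seg.length / 2
    let a := pvCounts x y (seg.take m)
    let b := pvCounts x y (seg.drop m)
    (a.1 + b.1, a.2 + b.2)
termination_by seg.length
decreasing_by
  · simp [List.length_take]; omega
  · simp [List.length_drop]; omega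

def majorityWins_alt (arr : List Int) (n : Int) (x : Int) (y : Int) : Int :=
  let c := pvCounts x y (PySem.List.slice arr none (some (max n 0)))
  if c.1 > c.2 then x
  else if c.2 > c.1 then y
  else min x y

-- ===== PRECONDITION & SPEC =====
-- Pre_ excludes n > len(arr), where A's arr[i] raises IndexError (B returns a value there).
def Pre_majorityWins (arr : List Int) (n : Int) (x : Int) (y : Int) : Prop :=
  n ≤ (arr.length : Int)
instance (arr : List Int) (n : Int) (x : Int) (y : Int) : Decidable (Pre_majorityWins arr n x y) := by unfold Pre_majorityWins; infer_instance
def pvWitness_majorityWins : List Int × Int × Int × Int := ([1, 2, 1], 3, 1, 2)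

def Spec_majorityWins (arr : List Int) (n : Int) (x : Int) (y : Int) (out : Int) : Prop := out = majorityWins_alt arr n x y
instance (arr : List Int) (n : Int) (x : Int) (y : Int) (out : Int) : Decidable (Spec_majorityWins arr n x y out) := by unfold Spec_majorityWins; infer_instance

-- ===== CLAIM (what is proved, stated in full; the proofs are below) =====
def Claim_equal_majorityWins : Prop := ∀ (arr : List Int) (n : Int) (x : Int) (y : Int), Dom_majorityWins arr n x y → Pre_majorityWins arr n x y → Spec_majorityWins arr n x y (majorityWins arr n x y)

-- ===== LEMMAS AND PROOFS =====

-- A's indexed loop over range(n) is the element loop over arr.take n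
lemma rangeFold_eq_takeFold (arr : List Int) (f : Int × Int → Int → Int × Int) :
    ∀ (m : Nat), m ≤ arr.length → ∀ (init : Int × Int),
    (PySem.List.pyRange 0 (m : Int) 1).foldl (fun p i => f p (PySem.List.pyGetD arr i 0)) init
      = (arr.take m).foldl f init := by
  intro m
  induction m with
  | zero => intro _ init; simp
  | succ k ih =>
    intro hm init
    have hk : k ≤ arr.length := Nat.le_of_succ_le hm
    have hklt : k < arr.length := hm
    rw [show ((k + 1 : Nat) : Int) = (k : Int) + 1 by push_cast; ring,
        PySem.List.pyRange_one_succ_right (by positivity),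
        List.foldl_append, ih hk]
    rw [List.take_add_one, List.getElem?_eq_getElem hklt]
    simp only [Option.toList_some, List.foldl_append, List.foldl_cons, List.foldl_nil,
               PySem.List.pyGetD_natCast]
    rw [List.getD_eq_getElem arr 0 hklt]

-- A's pair loop computes (count of x, count of y-but-not-x)
lemma pairFold (x y : Int) :
    ∀ (l : List Int) (a b : Int),
    l.foldl (fun (p : Int × Int) v =>
        if v = x then (p.1 + 1, p.2)
        else if v = y then (p.1, p.2 + 1)
        else p) (a, b)
      = (a + (l.count x : Int), b + (l.countP (fun v => v == y && !(v == x)) : Int)) := by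
  intro l
  induction l with
  | nil => intro a b; simp
  | cons v t ih =>
    intro a b
    by_cases hx : v = x
    · subst hx
      simp only [List.foldl_cons, ih, List.count_cons_self, List.countP_cons]
      simp [Prod.ext_iff]
      omega
    · by_cases hy : v = y
      · subst hy
        simp only [List.foldl_cons, if_neg hx, ih, List.countP_cons, List.count_cons]
        simp [Prod.ext_iff, fun h : v = x => hx h]
        omega
      · simp only [List.foldl_cons, if_neg hx, if_neg hy, ih, List.count_cons, List.countP_cons]
        simp [hx, hy]

lemma countP_y_not_x (l : List Int) (x y : Int) (hxy : x ≠ y) :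
    l.countP (fun v => v == y && !(v == x)) = l.count y := by
  rw [List.count_eq_countP]
  apply List.countP_congr
  intro v _
  by_cases hy : v = y
  · subst hy; simp
    intro h; exact (hxy h.symm).elim
  · simp [hy]

-- B's divide-and-conquer helper computes the two counts
lemma pvCounts_spec_aux (x y : Int) :
    ∀ (k : Nat) (seg : List Int), seg.length = k →
    pvCounts x y seg = ((seg.count x : Int), (seg.count y : Int)) := by
  intro k
  induction k using Nat.strong_induction_on with
  | _ k ih =>
    intro seg hk
    by_cases h : seg.length ≤ 1
    · rw [pvCounts, dif_pos h]
      match seg, h with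
      | [], _ => simp
      | [v], _ =>
        simp only [List.count_cons, List.count_nil, beq_iff_eq]
        split_ifs <;> simp
    · rw [pvCounts, dif_neg h]
      dsimp only
      have hlen := List.take_append_drop (seg.length / 2) seg
      rw [ih (seg.take (seg.length / 2)).length (by subst hk; simp [List.length_take]; omega) _ rfl,
          ih (seg.drop (seg.length / 2)).length (by subst hk; simp [List.length_drop]; omega) _ rfl]
      conv_rhs => rw [← hlen]
      push_cast [List.count_append]
      simp

lemma pvCounts_spec (x y : Int) (seg : List Int) :
    pvCounts x y seg = ((seg.count x : Int), (seg.count y : Int)) := by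
  exact pvCounts_spec_aux x y seg.length seg rfl

theorem majorityWins_eq (arr : List Int) (n : Int) (x : Int) (y : Int)
    (hn : n ≤ (arr.length : Int)) :
    majorityWins arr n x y = majorityWins_alt arr n x y := by
  unfold majorityWins majorityWins_alt
  by_cases hneg : n ≤ 0
  · rw [PySem.List.pyRange_one_eq_nil hneg,
        show max n 0 = (0 : Int) by omega, PySem.List.slice_to arr le_rfl]
    simp [pvCounts_spec]
  · have h0 : 0 ≤ n := by omega
    have hmax : max n 0 = n := by omega
    have hm : n = ((n.toNat : Nat) : Int) := by omega
    have hmlen : n.toNat ≤ arr.length := by omega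
    rw [hmax, PySem.List.slice_to arr h0]
    rw [show PySem.List.pyRange 0 n 1 = PySem.List.pyRange 0 ((n.toNat : Nat) : Int) 1 by rw [← hm]]
    rw [rangeFold_eq_takeFold arr
          (fun (p : Int × Int) v => if v = x then (p.1 + 1, p.2) else if v = y then (p.1, p.2 + 1) else p)
          n.toNat hmlen, pairFold, pvCounts_spec]
    by_cases hxy : x = y
    · subst hxy
      -- A: frey = 0 here and both sides return x in every branch
      have hA : (arr.take n.toNat).countP (fun v => v == x && !(v == x)) = 0 := by
        apply List.countP_eq_zero.mpr; intro v _
        cases hvx : v == x <;> simp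
      rw [hA]
      simp only [Nat.cast_zero]
      split_ifs <;> omega
    · rw [countP_y_not_x _ _ _ hxy]
      simp

-- ===== VERDICT (by name: the statement is the Claim_ definition above) =====
theorem majorityWins_spec : Claim_equal_majorityWins := by
  intro arr n x y _ hpre
  unfold Spec_majorityWins
  exact majorityWins_eq arr n x y hpre
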